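-- pv_equiv track=rewrite | github.com/Hal-ws/--Algorithm-Problem-Solving | 15670.py | getCntList
-- ===== SOURCE A (Python) =====
-- def getCntList(road):
--     l = len(road)
--     cntList = [0 for i in range(l)]
--     cntList[0] = 1
--     for i in range(1, l):
--         if road[i - 1] < road[i]:
--             cntList[i] = cntList[i - 1]
--         else:
--             cntList[i] = cntList[i - 1] + 1
--     return cntList
-- ===== SOURCE B (Python) =====
-- def getCntList(road):
--     # two passes: per-position increment indicators, then a running prefix sum
--     inc = [1 if i == 0 or road[i - 1] >= road[i] else 0 for i in range(len(road))]
--     out = []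
--     total = 0
--     for d in inc:
--         total += d
--         out.append(total)
--     return out
-- ===== Notes on version B (the rewrite author's own statement) =====
-- stated objective: alternative
-- what changed: A interleaves one loop that writes a preallocated array by index, reading cntList[i-1] back from the array; B splits the job into two passes: build a 0/1 increment-indicator list, then prefix-sum it with a scalar accumulator.
import Mathlib
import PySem

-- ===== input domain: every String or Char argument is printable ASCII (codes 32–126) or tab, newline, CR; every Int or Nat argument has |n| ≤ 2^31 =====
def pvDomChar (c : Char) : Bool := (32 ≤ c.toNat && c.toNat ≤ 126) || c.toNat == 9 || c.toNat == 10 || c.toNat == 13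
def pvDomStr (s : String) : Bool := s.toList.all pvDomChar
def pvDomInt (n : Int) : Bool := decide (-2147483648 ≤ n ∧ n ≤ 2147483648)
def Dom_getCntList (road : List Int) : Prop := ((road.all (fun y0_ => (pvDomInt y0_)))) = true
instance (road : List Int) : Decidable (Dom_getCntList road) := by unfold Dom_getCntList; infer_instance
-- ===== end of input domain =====

-- B replaces A's single index-writing loop over a preallocated array by two passes
-- (an increment-indicator list, then a prefix-sum accumulation); same O(n) cost.


-- ===== PORT A =====
def getCntList (road : List Int) : List Int :=
  let l : Int := PySem.List.len road
  let cntList : List Int := (PySem.List.pyRange 0 l 1).map (fun _ => (0 : Int))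
  let cntList := PySem.List.pySetD cntList 0 1
  (PySem.List.pyRange 1 l 1).foldl
    (fun c i =>
      if PySem.List.pyGetD road (i - 1) 0 < PySem.List.pyGetD road i 0 then
        PySem.List.pySetD c i (PySem.List.pyGetD c (i - 1) 0)
      else
        PySem.List.pySetD c i (PySem.List.pyGetD c (i - 1) 0 + 1))
    cntList

-- ===== PORT B =====
def getCntList_alt (road : List Int) : List Int :=
  let inc : List Int :=
    (PySem.List.pyRange 0 (PySem.List.len road) 1).map
      (fun i => if i == 0 || PySem.List.pyGetD road (i - 1) 0 ≥ PySem.List.pyGetD road i 0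
                then (1 : Int) else 0)
  (inc.foldl (fun (st : Int × List Int) d => (st.1 + d, st.2 ++ [st.1 + d])) (0, [])).2

-- ===== PRECONDITION & SPEC =====
-- A assigns one to index zero of cntList, an IndexError on the empty list; Pre_ excludes exactly that.
def Pre_getCntList (road : List Int) : Prop := road ≠ []
instance (road : List Int) : Decidable (Pre_getCntList road) := by unfold Pre_getCntList; infer_instance
def pvWitness_getCntList : List Int := ([1, 2, 2, 3])

def Spec_getCntList (road : List Int) (out : List Int) : Prop := out = getCntList_alt road
instance (road : List Int) (out : List Int) : Decidable (Spec_getCntList road out) := by unfold Spec_getCntList; infer_instance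

-- ===== CLAIM (what is proved, stated in full; the proofs are below) =====
def Claim_equal_getCntList : Prop := ∀ (road : List Int), Dom_getCntList road → Pre_getCntList road → Spec_getCntList road (getCntList road)

-- ===== LEMMAS AND PROOFS =====

/-- the increment contributed at position `i` (B's indicator). -/
def pvInc (road : List Int) (i : Int) : Int :=
  if i == 0 || PySem.List.pyGetD road (i - 1) 0 ≥ PySem.List.pyGetD road i 0 then 1 else 0

/-- the intended running count at position `n`. -/
def pvVal (road : List Int) : Nat → Int
  | 0 => 1
  | n + 1 => pvVal road n + pvInc road ((n : Int) + 1)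

def pvTot (road : List Int) : Nat → Int
  | 0 => 0
  | n + 1 => pvVal road n

theorem pvTot_add_inc (road : List Int) (n : Nat) :
    pvTot road n + pvInc road (n : Int) = pvVal road n := by
  cases n with
  | zero => simp [pvTot, pvVal, pvInc]
  | succ m =>
    show pvVal road m + pvInc road ((m + 1 : Nat) : Int) = pvVal road (m + 1)
    have h : ((m + 1 : Nat) : Int) = (m : Int) + 1 := by push_cast; ring
    rw [h]; rfl

theorem foldB (road : List Int) (n : Nat) :
    (((PySem.List.pyRange 0 (n : Int) 1).map (pvInc road)).foldl
        (fun (st : Int × List Int) d => (st.1 + d, st.2 ++ [st.1 + d])) (0, []))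
      = (pvTot road n, (List.range n).map (pvVal road)) := by
  induction n with
  | zero => simp [pvTot]
  | succ m ih =>
    have h : PySem.List.pyRange 0 ((m : Int) + 1) 1
        = PySem.List.pyRange 0 (m : Int) 1 ++ [(m : Int)] :=
      PySem.List.pyRange_one_succ_right (by positivity)
    have hcast : ((m + 1 : Nat) : Int) = (m : Int) + 1 := by push_cast; ring
    rw [hcast, h, List.map_append, List.foldl_append, ih]
    simp only [List.map_cons, List.map_nil, List.foldl_cons, List.foldl_nil]
    rw [pvTot_add_inc]
    have : pvTot road (m + 1) = pvVal road m := rfl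
    rw [List.range_succ, List.map_append, this]
    simp

theorem foldA (road : List Int) (n : Nat) (h1 : 1 ≤ n) (hn : n ≤ road.length) :
    ((PySem.List.pyRange 1 (n : Int) 1).foldl
        (fun c i =>
          if PySem.List.pyGetD road (i - 1) 0 < PySem.List.pyGetD road i 0 then
            PySem.List.pySetD c i (PySem.List.pyGetD c (i - 1) 0)
          else
            PySem.List.pySetD c i (PySem.List.pyGetD c (i - 1) 0 + 1))
        ((1 : Int) :: List.replicate (road.length - 1) 0))
      = (List.range n).map (pvVal road) ++ List.replicate (road.length - n) 0 := by
  induction n with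
  | zero => omega
  | succ m ih =>
    cases Nat.eq_or_lt_of_le h1 with
    | inl h0 =>
      -- n = 1 : empty range
      have hm : m = 0 := by omega
      subst hm
      simp [PySem.List.pyRange_one_eq_nil (by norm_num : (1:Int) ≤ 1), List.range_succ, pvVal]
    | inr hlt =>
      have hm1 : 1 ≤ m := by omega
      have hml : m ≤ road.length := by omega
      have hmlt : m < road.length := by omega
      have hcast : ((m + 1 : Nat) : Int) = (m : Int) + 1 := by push_cast; ring
      have hr : PySem.List.pyRange 1 ((m : Int) + 1) 1
          = PySem.List.pyRange 1 (m : Int) 1 ++ [(m : Int)] :=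
        PySem.List.pyRange_one_succ_right (by exact_mod_cast hm1)
      rw [hcast, hr, List.foldl_append, ih hm1 hml]
      set s : List Int := (List.range m).map (pvVal road) ++ List.replicate (road.length - m) 0 with hs
      simp only [List.foldl_cons, List.foldl_nil]
      -- index arithmetic: (m : Int) - 1 = ((m-1 : Nat) : Int)
      have hm0 : (1:Nat) ≤ m := hm1
      have hidx : ((m : Int) - 1) = ((m - 1 : Nat) : Int) := by
        have : ((m : Int)) = ((m - 1 : Nat) : Int) + 1 := by omega
        omega
      -- the value read: s[m-1] = pvVal road (m-1)
      have hlen : ((List.range m).map (pvVal road)).length = m := by simp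
      have hreads : PySem.List.pyGetD s ((m : Int) - 1) 0 = pvVal road (m - 1) := by
        rw [hidx, PySem.List.pyGetD_natCast]
        have hg : ((List.range m).map (pvVal road))[m - 1]? = some (pvVal road (m - 1)) := by
          rw [List.getElem?_map, List.getElem?_range (show m - 1 < m by omega)]; rfl
        rw [hs, List.getD_eq_getElem?_getD, List.getElem?_append_left (by omega), hg]
        rfl
      -- writing at index m hits the head of the replicate block
      have hwrite : ∀ v : Int, PySem.List.pySetD s (m : Int) v
          = (List.range m).map (pvVal road) ++ (v :: List.replicate (road.length - (m+1)) 0) := by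
        intro v
        rw [PySem.List.pySetD_natCast, hs]
        rw [List.set_append]
        simp only [hlen, Nat.sub_self, if_neg (lt_irrefl m)]
        congr 1
        have : road.length - m = (road.length - (m+1)) + 1 := by omega
        rw [this, List.replicate_succ, List.set_cons_zero]
      -- the values read from road
      have hroadm1 : PySem.List.pyGetD road ((m:Int) - 1) 0 = road.getD (m-1) 0 := by
        rw [hidx, PySem.List.pyGetD_natCast]
      have hroadm : PySem.List.pyGetD road (m:Int) 0 = road.getD m 0 := by
        rw [PySem.List.pyGetD_natCast]
      -- pvVal road m = pvVal road (m-1) + pvInc road m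
      have hval : pvVal road m = pvVal road (m-1) + pvInc road (m : Int) := by
        obtain ⟨k, rfl⟩ : ∃ k, m = k + 1 := ⟨m - 1, by omega⟩
        have hck : ((k + 1 : Nat) : Int) = (k : Int) + 1 := by push_cast; ring
        rw [show k + 1 - 1 = k from rfl, hck]
        rfl
      have hinc : pvInc road (m : Int)
          = if road.getD (m-1) 0 ≥ road.getD m 0 then 1 else 0 := by
        have h0 : m ≠ 0 := by omega
        unfold pvInc
        rw [hroadm1, hroadm]
        simp [h0]
      rw [List.range_succ, List.map_append]
      by_cases hc : road.getD (m-1) 0 < road.getD m 0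
      · rw [if_pos (by rw [hroadm1, hroadm]; exact hc)]
        rw [hreads, hwrite]
        have : pvVal road m = pvVal road (m-1) := by
          rw [hval, hinc, if_neg (not_le.mpr hc), add_zero]
        simp [this]
      · rw [if_neg (by rw [hroadm1, hroadm]; exact hc)]
        rw [hreads, hwrite]
        have : pvVal road m = pvVal road (m-1) + 1 := by
          rw [hval, hinc, if_pos (not_lt.mp hc)]
        simp [this]

theorem initA (road : List Int) (h : road ≠ []) :
    PySem.List.pySetD ((PySem.List.pyRange 0 (PySem.List.len road) 1).map (fun _ => (0:Int))) 0 1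
      = (1 : Int) :: List.replicate (road.length - 1) 0 := by
  have hl : 0 < road.length := List.length_pos_of_ne_nil h
  have : (PySem.List.pyRange 0 (PySem.List.len road) 1).map (fun _ => (0:Int))
      = List.replicate road.length 0 := by
    simp [PySem.List.len]
  rw [this]
  have h0 : PySem.List.pySetD (List.replicate road.length (0:Int)) 0 1
      = (List.replicate road.length (0:Int)).set 0 1 := by
    have : ((0:Int)) = ((0 : Nat) : Int) := rfl
    rw [this, PySem.List.pySetD_natCast]
  rw [h0]
  obtain ⟨k, hk⟩ : ∃ k, road.length = k + 1 := ⟨road.length - 1, by omega⟩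
  rw [hk]
  simp [List.replicate_succ]

-- ===== VERDICT (by name: the statement is the Claim_ definition above) =====
theorem getCntList_spec : Claim_equal_getCntList := by
  intro road _ hpre
  unfold Spec_getCntList getCntList getCntList_alt
  have hl : 0 < road.length := List.length_pos_of_ne_nil hpre
  simp only []
  rw [initA road hpre]
  have hinc : (PySem.List.pyRange 0 (PySem.List.len road) 1).map
      (fun i => if i == 0 || PySem.List.pyGetD road (i - 1) 0 ≥ PySem.List.pyGetD road i 0
                then (1 : Int) else 0)
      = (PySem.List.pyRange 0 ((road.length : Nat) : Int) 1).map (pvInc road) := by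
    simp [PySem.List.len, pvInc]
  rw [hinc, foldB road road.length]
  have : PySem.List.len road = ((road.length : Nat) : Int) := by simp [PySem.List.len]
  rw [this, foldA road road.length hl le_rfl]
  simp
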